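-- pv_equiv track=rewrite | github.com/VasilMG/Python_Advanced_OOP | Python_Advanced/Functions/exc/negative_positive.py | stronger
-- ===== SOURCE A (Python) =====
-- def stronger(*args):
--     positive = [int(x) for x in args[0] if int(x) >0]
--     negative = [int(y) for y in args[0] if int(y) < 0]
--     if sum(positive) > abs(sum(negative)):
--         message = "The positives are stronger than the negatives"
--     else:
--         message = "The negatives are stronger than the positives"
--     return sum(negative), sum(positive), message
-- ===== SOURCE B (Python) =====
-- def stronger(*args):
--     vals = [int(x) for x in args[0]]
--     total = sum(vals)
--     absum = sum(abs(v) for v in vals)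
--     positive_sum = (absum + total) // 2
--     negative_sum = (total - absum) // 2
--     if total > 0:
--         message = "The positives are stronger than the negatives"
--     else:
--         message = "The negatives are stronger than the positives"
--     return negative_sum, positive_sum, message
-- ===== Notes on version B (the rewrite author's own statement) =====
-- stated objective: alternative
-- what changed: Instead of filtering positives and negatives and summing each, B computes the total and the sum of absolute values once and recovers both partial sums by the identity pos=(absum+total)/2, neg=(total-absum)/2, deciding the message from the sign of the total.
import Mathlib
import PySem

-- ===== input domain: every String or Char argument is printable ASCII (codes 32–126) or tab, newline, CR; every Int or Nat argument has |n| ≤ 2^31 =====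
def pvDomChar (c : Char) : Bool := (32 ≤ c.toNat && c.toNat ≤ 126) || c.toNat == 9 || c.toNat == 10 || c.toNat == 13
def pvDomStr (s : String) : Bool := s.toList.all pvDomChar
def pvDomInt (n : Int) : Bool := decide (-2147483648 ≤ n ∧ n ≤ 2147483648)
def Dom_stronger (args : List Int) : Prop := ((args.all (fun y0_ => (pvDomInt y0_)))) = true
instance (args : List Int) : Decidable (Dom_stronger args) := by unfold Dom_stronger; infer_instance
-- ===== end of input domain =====

-- B recovers both partial sums from the total and the sum of absolute values via
-- pos=(absum+total)//2, neg=(total-absum)//2, and decides the message from the sign of the total.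

-- ===== PORT A =====
def stronger (args : List Int) : Int × Int × String :=
  let positive := (args.filter (fun x => decide (x > 0))).map (fun x => x)
  let negative := (args.filter (fun y => decide (y < 0))).map (fun y => y)
  let message :=
    if positive.sum > |negative.sum| then
      "The positives are stronger than the negatives"
    else
      "The negatives are stronger than the positives"
  (negative.sum, positive.sum, message)

-- ===== PORT B =====
def stronger_alt (args : List Int) : Int × Int × String :=
  let vals := args.map (fun x => x)
  let total := vals.sum
  let absum := (vals.map (fun v => |v|)).sum
  let positive_sum := PySem.Int.floordiv (absum + total) 2
  let negative_sum := PySem.Int.floordiv (total - absum) 2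
  let message :=
    if total > 0 then
      "The positives are stronger than the negatives"
    else
      "The negatives are stronger than the positives"
  (negative_sum, positive_sum, message)

-- ===== PRECONDITION & SPEC =====
def Spec_stronger (args : List Int) (out : Int × Int × String) : Prop := out = stronger_alt args
instance (args : List Int) (out : Int × Int × String) : Decidable (Spec_stronger args out) := by unfold Spec_stronger; infer_instance

-- ===== CLAIM (what is proved, stated in full; the proofs are below) =====
def Claim_equal_stronger : Prop := ∀ (args : List Int), Dom_stronger args → Spec_stronger args (stronger args)

-- ===== LEMMAS AND PROOFS =====
-- |x| + x = 2·(positive part), x - |x| = 2·(negative part), elementwise and summed.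
theorem stronger_sums (args : List Int) :
    (args.map (fun v => |v|)).sum + args.sum
      = 2 * (args.filter (fun x => decide (x > 0))).sum ∧
    args.sum - (args.map (fun v => |v|)).sum
      = 2 * (args.filter (fun y => decide (y < 0))).sum := by
  induction args with
  | nil => simp
  | cons a t ih =>
    obtain ⟨h1, h2⟩ := ih
    simp only [List.map_cons, List.sum_cons, List.filter_cons]
    rcases lt_trichotomy a 0 with h | h | h
    · have : |a| = -a := abs_of_neg h
      constructor
      · simp only [decide_eq_true_eq]
        rw [if_neg (by omega)]
        omega
      · rw [if_pos (by simpa using h)]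
        simp only [List.sum_cons]; omega
    · subst h; simpa using ⟨h1, h2⟩
    · have : |a| = a := abs_of_pos h
      constructor
      · rw [if_pos (by simpa using h)]
        simp only [List.sum_cons]; omega
      · simp only [decide_eq_true_eq]
        rw [if_neg (by omega)]
        omega

theorem stronger_negsum_nonpos (args : List Int) :
    (args.filter (fun y => decide (y < 0))).sum ≤ 0 := by
  induction args with
  | nil => simp
  | cons a t ih =>
    simp only [List.filter_cons]
    split_ifs with h
    · simp only [List.sum_cons]
      simp only [decide_eq_true_eq] at h
      omega
    · exact ih

theorem stronger_floordiv_two (k : Int) : PySem.Int.floordiv (2 * k) 2 = k := by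
  simp [PySem.Int.floordiv, Int.mul_fdiv_cancel_left _ (by norm_num : (2:Int) ≠ 0)]

-- ===== VERDICT (by name: the statement is the Claim_ definition above) =====
theorem stronger_spec : Claim_equal_stronger := by
  intro args _
  unfold Spec_stronger stronger stronger_alt
  obtain ⟨h1, h2⟩ := stronger_sums args
  have hneg := stronger_negsum_nonpos args
  simp only [List.map_id']
  rw [h1, h2, stronger_floordiv_two, stronger_floordiv_two]
  have hmsg : ((args.filter (fun x => decide (x > 0))).sum >
      |(args.filter (fun y => decide (y < 0))).sum|) ↔ args.sum > 0 := by
    rw [abs_of_nonpos hneg]; omega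
  by_cases h : args.sum > 0
  · rw [if_pos (hmsg.mpr h), if_pos h]
  · rw [if_neg (fun hh => h (hmsg.mp hh)), if_neg h]
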